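-- pv_equiv track=rewrite | github.com/lorenzobunaj/RHUL-MPC-Challenges | challenges/03-implementation-techniques/01-garbled-row-reduction/solution/solver.py | has_equal_values
-- ===== SOURCE A (Python) =====
-- def has_equal_values(h, n):
--     for i in range(len(h)):
--         cnt = 0
--         for j in range(len(h)):
--             if i != j and h[i] == h[j]:
--                 cnt += 1
--         if cnt == n-1:
--             return True
--
--     return False
-- ===== SOURCE B (Python) =====
-- def has_equal_values(h, n):
--     counts = {}
--     for x in h:
--         counts[x] = counts.get(x, 0) + 1
--     return n in counts.values()
-- ===== Notes on version B (the rewrite author's own statement) =====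
-- stated objective: faster
-- what changed: Replaces the quadratic nested scan (for each index, re-count its equal partners) by a single pass that builds a frequency dictionary once and then tests whether n occurs among its values.
import Mathlib
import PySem

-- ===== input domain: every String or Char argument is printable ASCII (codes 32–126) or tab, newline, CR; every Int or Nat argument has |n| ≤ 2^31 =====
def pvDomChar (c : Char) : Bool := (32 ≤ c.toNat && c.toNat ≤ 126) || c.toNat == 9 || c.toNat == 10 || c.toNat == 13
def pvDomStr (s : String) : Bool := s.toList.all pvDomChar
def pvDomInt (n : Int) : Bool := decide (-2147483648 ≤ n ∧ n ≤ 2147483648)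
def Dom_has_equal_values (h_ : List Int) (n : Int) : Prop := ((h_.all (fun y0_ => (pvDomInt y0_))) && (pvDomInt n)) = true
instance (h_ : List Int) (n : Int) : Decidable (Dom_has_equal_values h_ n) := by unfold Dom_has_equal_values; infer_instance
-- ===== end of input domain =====

-- B replaces A's quadratic nested re-counting scan by one frequency-dictionary pass (objective: faster).

-- ===== PORT A =====
-- for each i, count the j ≠ i with h[i] == h[j]; True as soon as that count equals n-1
def has_equal_values (h_ : List Int) (n : Int) : Bool :=
  (PySem.List.pyRange 0 (h_.length : Int) 1).any (fun i =>
    let cnt : Int := (PySem.List.pyRange 0 (h_.length : Int) 1).foldl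
      (fun cnt j =>
        if i ≠ j ∧ PySem.List.pyGetD h_ i 0 = PySem.List.pyGetD h_ j 0 then cnt + 1 else cnt) 0
    cnt == n - 1)

-- ===== PORT B =====
-- build counts = {x: multiplicity} in one pass, then test n in counts.values()
def has_equal_values_alt (h_ : List Int) (n : Int) : Bool :=
  let counts := h_.foldl (fun d x => d.modify x 0 (· + 1)) PySem.Dict.empty
  counts.values.contains n

-- ===== PRECONDITION & SPEC =====
def Spec_has_equal_values (h_ : List Int) (n : Int) (out : Bool) : Prop := out = has_equal_values_alt h_ n
instance (h_ : List Int) (n : Int) (out : Bool) : Decidable (Spec_has_equal_values h_ n out) := by unfold Spec_has_equal_values; infer_instance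

-- ===== CLAIM (what is proved, stated in full; the proofs are below) =====
def Claim_equal_has_equal_values : Prop := ∀ (h_ : List Int) (n : Int), Dom_has_equal_values h_ n → Spec_has_equal_values h_ n (has_equal_values h_ n)

-- ===== LEMMAS AND PROOFS =====

-- B is true iff some value of h_ has multiplicity n
theorem alt_iff (h_ : List Int) (n : Int) :
    has_equal_values_alt h_ n = true ↔ ∃ x ∈ h_, (h_.count x : Int) = n := by
  unfold has_equal_values_alt
  rw [← PySem.Dict.counter_eq_foldl]
  simp only [PySem.Dict.values, PySem.Dict.items_counter, List.contains_iff_mem,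
    List.map_map, List.mem_map]
  constructor
  · rintro ⟨k, hk, hkn⟩
    exact ⟨k, (PySem.Set.mem_ofList h_ k).1 hk, hkn⟩
  · rintro ⟨k, hk, hkn⟩
    exact ⟨k, (PySem.Set.mem_ofList h_ k).2 hk, hkn⟩

-- the inner loop of A computes count(h[i]) - 1
theorem inner_eq (h_ : List Int) (i : Int) (h0 : 0 ≤ i) (h1 : i < (h_.length : Int)) :
    (PySem.List.pyRange 0 (h_.length : Int) 1).foldl
      (fun cnt j =>
        if i ≠ j ∧ PySem.List.pyGetD h_ i 0 = PySem.List.pyGetD h_ j 0 then cnt + 1 else cnt) (0 : Int)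
    = (h_.count (PySem.List.pyGetD h_ i 0) : Int) - 1 := by
  set x := PySem.List.pyGetD h_ i 0 with hx
  have hfun : (fun (cnt : Int) (j : Int) =>
      if i ≠ j ∧ PySem.List.pyGetD h_ j 0 = x then cnt + 1 else cnt)
      = (fun cnt j => if (decide (i ≠ j ∧ PySem.List.pyGetD h_ j 0 = x)) = true then cnt + 1 else cnt) := by
    funext cnt j; simp only [decide_eq_true_eq]
  have hcomm : (fun (cnt : Int) (j : Int) =>
      if i ≠ j ∧ x = PySem.List.pyGetD h_ j 0 then cnt + 1 else cnt)
      = (fun cnt j => if i ≠ j ∧ PySem.List.pyGetD h_ j 0 = x then cnt + 1 else cnt) := by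
    funext cnt j
    by_cases h : i ≠ j ∧ PySem.List.pyGetD h_ j 0 = x
    · rw [if_pos ⟨h.1, h.2.symm⟩, if_pos h]
    · rw [if_neg (fun hc => h ⟨hc.1, hc.2.symm⟩), if_neg h]
  rw [hcomm, hfun, PySem.List.foldl_count_if]
  -- count via the mapped range
  have hmap : h_ = (PySem.List.pyRange 0 (h_.length : Int) 1).map
      (fun j => PySem.List.pyGetD h_ j 0) := by
    have := PySem.List.map_pyGetD_pyRange_zero h_ 0
    simpa [PySem.List.len] using this.symm
  have hcount : h_.count x =
      (PySem.List.pyRange 0 (h_.length : Int) 1).countP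
        (fun j => decide (PySem.List.pyGetD h_ j 0 = x)) := by
    conv_lhs => rw [hmap]
    rw [List.count_eq_countP, List.countP_map]
    apply List.countP_congr
    intro j _
    simp only [Function.comp_apply, beq_iff_eq, decide_eq_true_eq]
  -- split the range at i
  have hsplit : PySem.List.pyRange 0 (h_.length : Int) 1
      = PySem.List.pyRange 0 i 1 ++ (i :: PySem.List.pyRange (i+1) (h_.length : Int) 1) := by
    rw [PySem.List.pyRange_one_append 0 i (h_.length : Int) h0 (le_of_lt h1),
      PySem.List.pyRange_one_cons h1]
  have hlo : ∀ j ∈ PySem.List.pyRange 0 i 1,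
      (decide (i ≠ j ∧ PySem.List.pyGetD h_ j 0 = x)) = true
        ↔ (decide (PySem.List.pyGetD h_ j 0 = x)) = true := by
    intro j hj
    have := (PySem.List.mem_pyRange_one).1 hj
    simp only [decide_eq_true_eq]
    exact ⟨fun h => h.2, fun h => ⟨by omega, h⟩⟩
  have hhi : ∀ j ∈ PySem.List.pyRange (i+1) (h_.length : Int) 1,
      (decide (i ≠ j ∧ PySem.List.pyGetD h_ j 0 = x)) = true
        ↔ (decide (PySem.List.pyGetD h_ j 0 = x)) = true := by
    intro j hj
    have := (PySem.List.mem_pyRange_one).1 hj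
    simp only [decide_eq_true_eq]
    exact ⟨fun h => h.2, fun h => ⟨by omega, h⟩⟩
  rw [hcount, hsplit]
  rw [List.countP_append, List.countP_append, List.countP_cons, List.countP_cons,
    List.countP_congr hlo, List.countP_congr hhi]
  simp [hx]
  omega

-- element at an in-range index is a member
theorem pyGetD_mem' (h_ : List Int) (i : Int) (h0 : 0 ≤ i) (h1 : i < (h_.length : Int)) :
    PySem.List.pyGetD h_ i 0 ∈ h_ := by
  rw [PySem.List.pyGetD_eq_getElem h_ 0 h0 h1]
  exact List.getElem_mem _

-- A is true iff some value of h_ has multiplicity n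
theorem a_iff (h_ : List Int) (n : Int) :
    has_equal_values h_ n = true ↔ ∃ x ∈ h_, (h_.count x : Int) = n := by
  unfold has_equal_values
  simp only [List.any_eq_true]
  constructor
  · rintro ⟨i, hi, hcnt⟩
    obtain ⟨h0, h1⟩ := (PySem.List.mem_pyRange_one).1 hi
    rw [inner_eq h_ i h0 h1] at hcnt
    refine ⟨PySem.List.pyGetD h_ i 0, pyGetD_mem' h_ i h0 h1, ?_⟩
    have := of_decide_eq_true (by simpa using hcnt)
    omega
  · rintro ⟨x, hx, hxn⟩
    obtain ⟨k, hk, hkx⟩ := List.mem_iff_getElem.1 hx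
    refine ⟨(k : Int), ?_, ?_⟩
    · rw [PySem.List.mem_pyRange_one]
      exact ⟨Int.natCast_nonneg k, by exact_mod_cast hk⟩
    · have hg : PySem.List.pyGetD h_ (k : Int) 0 = x := by
        rw [PySem.List.pyGetD_eq_getElem h_ 0 (Int.natCast_nonneg k) (by exact_mod_cast hk)]
        simpa using hkx
      rw [inner_eq h_ (k : Int) (Int.natCast_nonneg k) (by exact_mod_cast hk), hg]
      simp
      omega

-- ===== VERDICT (by name: the statement is the Claim_ definition above) =====
theorem has_equal_values_spec : Claim_equal_has_equal_values := by
  intro h_ n _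
  unfold Spec_has_equal_values
  by_cases hA : has_equal_values h_ n = true
  · have := (alt_iff h_ n).2 ((a_iff h_ n).1 hA)
    rw [hA, this]
  · have hB : ¬ has_equal_values_alt h_ n = true :=
      fun h => hA ((a_iff h_ n).2 ((alt_iff h_ n).1 h))
    simp only [Bool.not_eq_true] at hA hB
    rw [hA, hB]
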